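-- pv_equiv track=rewrite | github.com/julianespinel/blog-code | python-profiling/brute_force.py | get_positions_per_score
-- ===== SOURCE A (Python) =====
-- def get_positions_per_score(ranks: list[int], scores: list[int]) -> list[int]:
--     '''
--     Time complexity: O(scores) * O(ranks log ranks)
--     '''
--     positions = []
--     for score in scores:  # O(scores)
--         # amortized O(1), why? see: https://stackoverflow.com/a/33045038/2420718
--         ranks.append(score)
--         ranks = sorted(ranks, reverse=True)  # O(ranks log ranks)
--         position = ranks.index(score)  # O(ranks)
--         positions.append(position)  # amortized O(1)
--
--     return positions
-- ===== SOURCE B (Python) =====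
-- def get_positions_per_score(ranks: list[int], scores: list[int]) -> list[int]:
--     # Sort once, then for each score binary-search (bisect_right, hand-written:
--     # this module imports nothing) the ascending pool; the number of strictly
--     # greater elements is len(pool) - insertion_point.  Insert the score to
--     # keep the pool sorted.
--     pool = sorted(ranks)
--     positions = []
--     for score in scores:
--         lo, hi = 0, len(pool)
--         while lo < hi:
--             mid = (lo + hi) // 2
--             if pool[mid] <= score:
--                 lo = mid + 1
--             else:
--                 hi = mid
--         positions.append(len(pool) - lo)
--         pool.insert(lo, score)
--     return positions
-- ===== Notes on version B (the rewrite author's own statement) =====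
-- stated objective: faster
-- what changed: Instead of appending each score, re-sorting the whole list descending and scanning for the score's first index, B sorts once ascending and per score does a hand-written binary search (bisect_right) for the insertion point, emitting len(pool)-lo as the count of strictly greater elements.
import Mathlib
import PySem

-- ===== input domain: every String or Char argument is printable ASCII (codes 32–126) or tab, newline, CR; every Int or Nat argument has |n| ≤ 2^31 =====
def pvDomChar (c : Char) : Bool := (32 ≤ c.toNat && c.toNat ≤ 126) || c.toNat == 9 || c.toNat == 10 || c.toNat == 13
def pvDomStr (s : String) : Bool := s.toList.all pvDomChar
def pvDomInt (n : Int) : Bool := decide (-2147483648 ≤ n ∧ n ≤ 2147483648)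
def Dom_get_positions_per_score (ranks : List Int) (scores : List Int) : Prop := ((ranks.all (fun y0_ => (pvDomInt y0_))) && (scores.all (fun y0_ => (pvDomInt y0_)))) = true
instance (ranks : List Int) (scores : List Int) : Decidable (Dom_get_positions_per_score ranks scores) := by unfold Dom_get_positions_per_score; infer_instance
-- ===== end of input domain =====

-- ===== PORT A =====
-- A re-sorts descending per score; B sorts once and binary-searches per score.
-- Return-value equivalence only: Python A appends scores[0] to the caller's `ranks` list in place; B does not mutate it.
-- `ranks.index(score)` cannot raise here (score was just appended), so `.getD 0` is never hit.
def get_positions_per_score (ranks : List Int) (scores : List Int) : List Int :=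
  (scores.foldl (fun (st : List Int × List Int) score =>
      let r := PySem.List.sorted (st.1 ++ [score]) (fun x => x) true
      let position : Int := ((PySem.List.index? r score).getD 0 : Nat)
      (r, st.2 ++ [position]))
    (ranks, [])).2

-- ===== PORT B =====
-- the hand-written bisect_right loop of Source B ('while lo < hi: …'), recursion on hi - lo;
-- pool[mid] is always in range (0 ≤ lo ≤ mid < hi ≤ len(pool)), so `.getD … 0` is never the default
def pvBisect (pool : List Int) (score : Int) (lo hi : Nat) : Nat :=
  if h : lo < hi then
    let mid := (lo + hi) / 2
    if pool.getD mid 0 ≤ score then pvBisect pool score (mid + 1) hi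
    else pvBisect pool score lo mid
  else lo
termination_by hi - lo
decreasing_by
  · omega
  · omega

def get_positions_per_score_alt (ranks : List Int) (scores : List Int) : List Int :=
  (scores.foldl (fun (st : List Int × List Int) score =>
      let lo := pvBisect st.1 score 0 st.1.length
      (PySem.List.insert st.1 (lo : Int) score,
       st.2 ++ [((st.1.length - lo : Nat) : Int)]))
    (PySem.List.sorted ranks (fun x => x) false, [])).2

-- ===== PRECONDITION & SPEC =====
def Spec_get_positions_per_score (ranks : List Int) (scores : List Int) (out : List Int) : Prop := out = get_positions_per_score_alt ranks scores
instance (ranks : List Int) (scores : List Int) (out : List Int) : Decidable (Spec_get_positions_per_score ranks scores out) := by unfold Spec_get_positions_per_score; infer_instance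

-- ===== CLAIM (what is proved, stated in full; the proofs are below) =====
def Claim_equal_get_positions_per_score : Prop := ∀ (ranks : List Int) (scores : List Int), Dom_get_positions_per_score ranks scores → Spec_get_positions_per_score ranks scores (get_positions_per_score ranks scores)

-- ===== LEMMAS AND PROOFS =====

-- In a descending-sorted list containing s, the first index of s is the count of elements > s.
theorem index_desc_eq_countP (l : List Int) (s : Int)
    (hd : l.Pairwise (fun a b => b ≤ a)) (hm : s ∈ l) :
    PySem.List.index? l s = some (l.countP (fun x => decide (s < x))) := by
  induction l with
  | nil => cases hm
  | cons h t ih =>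
    rcases List.pairwise_cons.mp hd with ⟨hle, hdt⟩
    by_cases he : h = s
    · subst he
      have hz : t.countP (fun x => decide (h < x)) = 0 := by
        rw [List.countP_eq_zero]
        intro x hx
        simp only [decide_eq_true_eq]
        exact not_lt.mpr (hle x hx)
      rw [PySem.List.index?_cons_self]
      simp [hz]
    · have hmt : s ∈ t := by
        rcases List.mem_cons.mp hm with h' | h'
        · exact absurd h'.symm he
        · exact h'
      have hs : s < h := lt_of_le_of_ne (hle s hmt) (fun h' => he h'.symm)
      rw [PySem.List.index?_cons_of_ne t he, ih hdt hmt]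
      simp [hs]

-- A's per-step value: first index of s in sorted(r ++ [s], reverse=True) = #{x ∈ r | x > s}
theorem step_value (r : List Int) (s : Int) :
    PySem.List.index? (PySem.List.sorted (r ++ [s]) (fun x => x) true) s
      = some (r.countP (fun x => decide (s < x))) := by
  have hperm := PySem.List.sorted_perm (r ++ [s]) (fun x => x) true
  have hm : s ∈ PySem.List.sorted (r ++ [s]) (fun x => x) true :=
    hperm.mem_iff.mpr (by simp)
  rw [index_desc_eq_countP _ s (by simpa using PySem.List.sorted_pairwise_rev (r ++ [s]) (fun x => x)) hm,
    hperm.countP_eq]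
  simp [List.countP_append]

-- if p holds exactly below index k, then countP p = k
theorem countP_eq_of_split (p : Int → Bool) (l : List Int) (k : Nat) (hk : k ≤ l.length)
    (h1 : ∀ i (h : i < l.length), i < k → p l[i])
    (h2 : ∀ i (h : i < l.length), k ≤ i → ¬ p l[i] = true) :
    l.countP p = k := by
  induction l generalizing k with
  | nil => simp_all
  | cons x t ih =>
    cases k with
    | zero =>
      rw [List.countP_eq_zero]
      intro a ha
      rcases List.mem_iff_getElem.mp ha with ⟨i, hi, rfl⟩
      exact h2 i hi (Nat.zero_le i)
    | succ k =>
      have hx : p x = true := h1 0 (by simp) (Nat.succ_pos k)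
      have ht : t.countP p = k := by
        refine ih k (by simpa using hk) ?_ ?_
        · intro i h hik
          have := h1 (i + 1) (by simpa using Nat.succ_lt_succ h) (Nat.succ_lt_succ hik)
          simpa using this
        · intro i h hik
          have := h2 (i + 1) (by simpa using Nat.succ_lt_succ h) (Nat.succ_le_succ hik)
          simpa using this
      simp [hx, ht]

-- in an ascending-sorted list, (· ≤ s) holds exactly below countP (· ≤ s)
theorem split_of_sorted (l : List Int) (s : Int) (hsort : l.Pairwise (· ≤ ·)) :
    (∀ i (h : i < l.length), i < l.countP (fun x => decide (x ≤ s)) → l[i] ≤ s) ∧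
    (∀ i (h : i < l.length), l.countP (fun x => decide (x ≤ s)) ≤ i → s < l[i]) := by
  induction l with
  | nil => exact ⟨fun i h => absurd h (by simp), fun i h => absurd h (by simp)⟩
  | cons x t ih =>
    rcases List.pairwise_cons.mp hsort with ⟨hle, hdt⟩
    rcases ih hdt with ⟨ih1, ih2⟩
    by_cases hx : x ≤ s
    · have hc : (x :: t).countP (fun x => decide (x ≤ s)) = t.countP (fun x => decide (x ≤ s)) + 1 := by
        simp [hx]
      constructor
      · intro i h hik
        cases i with
        | zero => simpa using hx
        | succ i =>
          have := ih1 i (by simpa using h) (by omega)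
          simpa using this
      · intro i h hik
        cases i with
        | zero => omega
        | succ i =>
          have := ih2 i (by simpa using h) (by omega)
          simpa using this
    · have hz : t.countP (fun x => decide (x ≤ s)) = 0 := by
        rw [List.countP_eq_zero]
        intro a ha
        simp only [decide_eq_true_eq]
        intro hsa
        exact hx (le_trans (hle a ha) hsa)
      have hc : (x :: t).countP (fun x => decide (x ≤ s)) = 0 := by
        simp [hx, hz]
      refine ⟨fun i h hik => by omega, fun i h _ => ?_⟩
      cases i with
      | zero => simpa using not_le.mp hx
      | succ i =>
        have hlen : i < t.length := by simp at h; omega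
        have := hle (t[i]'hlen) (List.getElem_mem hlen)
        have hxs := not_le.mp hx
        simp only [List.getElem_cons_succ]
        omega

-- the bisect loop computes countP (· ≤ s) under the split invariants
theorem bisect_spec (pool : List Int) (s : Int) (hsort : pool.Pairwise (· ≤ ·)) :
    ∀ n lo hi, hi - lo = n → lo ≤ hi → hi ≤ pool.length →
    (∀ i, i < lo → i < pool.length → pool.getD i 0 ≤ s) →
    (∀ i, hi ≤ i → i < pool.length → s < pool.getD i 0) →
    pvBisect pool s lo hi = pool.countP (fun x => decide (x ≤ s)) := by
  have hmono : ∀ i j (hj : j < pool.length), i ≤ j → pool.getD i 0 ≤ pool.getD j 0 := by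
    intro i j hj hij
    have hi : i < pool.length := lt_of_le_of_lt (le_of_eq rfl) (by omega)
    rw [List.getD_eq_getElem _ _ hi, List.getD_eq_getElem _ _ hj]
    rcases Nat.lt_or_ge i j with h | h
    · exact List.pairwise_iff_getElem.mp hsort i j hi hj h
    · have : i = j := by omega
      subst this; rfl
  intro n
  induction n using Nat.strong_induction_on with
  | _ n IH =>
    intro lo hi hn hlh hhl h1 h2
    rw [pvBisect]
    by_cases h : lo < hi
    · simp only [dif_pos h]
      by_cases hm : pool.getD ((lo + hi) / 2) 0 ≤ s
      · rw [if_pos hm]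
        refine IH (hi - ((lo + hi) / 2 + 1)) (by omega) _ _ rfl (by omega) hhl ?_ h2
        intro i hi' hilen
        exact le_trans (hmono i ((lo + hi) / 2) (by omega) (by omega)) hm
      · rw [if_neg hm]
        refine IH ((lo + hi) / 2 - lo) (by omega) _ _ rfl (by omega) (by omega) h1 ?_
        intro i hi' hilen
        have := hmono ((lo + hi) / 2) i hilen hi'
        have hms : s < pool.getD ((lo + hi) / 2) 0 := not_le.mp hm
        omega
    · simp only [dif_neg h]
      have hlo : lo = hi := by omega
      subst hlo
      refine (countP_eq_of_split _ pool lo (by omega) ?_ ?_).symm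
      · intro i hi' hik
        rw [← List.getD_eq_getElem _ 0 hi'] at *
        simpa using h1 i hik hi'
      · intro i hi' hik
        have := h2 i hik hi'
        rw [← List.getD_eq_getElem _ 0 hi']
        simpa using not_le.mpr this

-- inserting s at the split point keeps the pool sorted
theorem pairwise_insert_split (pool : List Int) (s : Int) (lo : Nat) (hlo : lo ≤ pool.length)
    (h1 : ∀ i (h : i < pool.length), i < lo → pool[i] ≤ s)
    (h2 : ∀ i (h : i < pool.length), lo ≤ i → s < pool[i])
    (hsort : pool.Pairwise (· ≤ ·)) :
    (pool.take lo ++ s :: pool.drop lo).Pairwise (· ≤ ·) := by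
  rw [List.pairwise_append]
  have hta : ∀ a ∈ pool.take lo, a ≤ s := by
    intro a ha
    rcases List.mem_take_iff_getElem.mp ha with ⟨i, hi, rfl⟩
    exact h1 i (by omega) (by omega)
  have hda : ∀ b ∈ pool.drop lo, s ≤ b := by
    intro b hb
    rcases List.mem_iff_getElem.mp hb with ⟨j, hj, rfl⟩
    rw [List.getElem_drop]
    exact le_of_lt (h2 (lo + j) (by simp at hj; omega) (by omega))
  refine ⟨hsort.sublist (List.take_sublist lo pool), ?_, ?_⟩
  · rw [List.pairwise_cons]
    exact ⟨hda, hsort.sublist (List.drop_sublist lo pool)⟩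
  · intro a ha b hb
    rcases List.mem_cons.mp hb with rfl | hb'
    · exact hta a ha
    · exact le_trans (hta a ha) (hda b hb')

-- length = countP (· ≤ s) + countP (s < ·)
theorem length_split (l : List Int) (s : Int) :
    l.length = l.countP (fun x => decide (x ≤ s)) + l.countP (fun x => decide (s < x)) := by
  rw [List.length_eq_countP_add_countP (fun x => decide (x ≤ s))]
  congr 1
  refine List.countP_congr (fun x _ => ?_)
  simp [not_le]

-- the two loops agree when A's list is a permutation of B's ascending-sorted pool
theorem loop_eq (scores : List Int) : ∀ (rA pool acc : List Int),
    rA.Perm pool → pool.Pairwise (· ≤ ·) →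
    (scores.foldl (fun (st : List Int × List Int) score =>
        let r := PySem.List.sorted (st.1 ++ [score]) (fun x => x) true
        let position : Int := ((PySem.List.index? r score).getD 0 : Nat)
        (r, st.2 ++ [position])) (rA, acc)).2
    = (scores.foldl (fun (st : List Int × List Int) score =>
        let lo := pvBisect st.1 score 0 st.1.length
        (PySem.List.insert st.1 (lo : Int) score,
         st.2 ++ [((st.1.length - lo : Nat) : Int)])) (pool, acc)).2 := by
  induction scores with
  | nil => intro rA pool acc _ _; rfl
  | cons s rest ih =>
    intro rA pool acc hp hsort
    simp only [List.foldl_cons]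
    have hc := split_of_sorted pool s hsort
    have hlo : pvBisect pool s 0 pool.length = pool.countP (fun x => decide (x ≤ s)) :=
      bisect_spec pool s hsort _ 0 pool.length rfl (Nat.zero_le _) le_rfl
        (fun i h _ => absurd h (Nat.not_lt_zero i)) (fun i h h' => absurd h (by omega))
    have hclen : pool.countP (fun x => decide (x ≤ s)) ≤ pool.length := List.countP_le_length
    have hins : PySem.List.insert pool ((pvBisect pool s 0 pool.length : Nat) : Int) s
        = pool.take (pool.countP (fun x => decide (x ≤ s))) ++ s :: pool.drop (pool.countP (fun x => decide (x ≤ s))) := by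
      rw [hlo]
      exact PySem.List.insert_natCast pool _ s hclen
    have hval : (((PySem.List.index? (PySem.List.sorted (rA ++ [s]) (fun x => x) true) s).getD 0 : Nat) : Int)
        = ((pool.length - pvBisect pool s 0 pool.length : Nat) : Int) := by
      rw [step_value, hlo]
      have hcp : rA.countP (fun x => decide (s < x)) = pool.countP (fun x => decide (s < x)) := hp.countP_eq _
      have := length_split pool s
      simp only [Option.getD_some]
      omega
    have hperm' : (PySem.List.sorted (rA ++ [s]) (fun x => x) true).Perm
        (pool.take (pool.countP (fun x => decide (x ≤ s))) ++ s :: pool.drop (pool.countP (fun x => decide (x ≤ s)))) := by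
      refine (PySem.List.sorted_perm (rA ++ [s]) (fun x => x) true).trans ?_
      refine ((hp.append_right [s]).trans ?_)
      refine ((List.perm_append_singleton s pool).trans ?_)
      conv_lhs => rw [← List.take_append_drop (pool.countP (fun x => decide (x ≤ s))) pool]
      exact List.perm_middle.symm
    have hsort' : (pool.take (pool.countP (fun x => decide (x ≤ s))) ++ s :: pool.drop (pool.countP (fun x => decide (x ≤ s)))).Pairwise (· ≤ ·) :=
      pairwise_insert_split pool s _ hclen hc.1 hc.2 hsort
    simp only [hval, hins]
    exact ih _ _ _ hperm' hsort'

-- ===== VERDICT (by name: the statement is the Claim_ definition above) =====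
theorem get_positions_per_score_spec : Claim_equal_get_positions_per_score := by
  intro ranks scores _
  unfold Spec_get_positions_per_score get_positions_per_score get_positions_per_score_alt
  refine loop_eq scores ranks (PySem.List.sorted ranks (fun x => x) false) []
    (PySem.List.sorted_perm ranks (fun x => x) false).symm
    (by simpa using PySem.List.sorted_pairwise ranks (fun x => x))
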